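-- pv_equiv track=rewrite | github.com/galaxybomb23/LAFVT | src/analyzer/selectors/post/_callgraph.py | find_root_callers
-- ===== SOURCE A (Python) =====
-- from collections import defaultdict
-- from typing import Dict, List, Optional, Set, Tuple
--
-- def invert_call_map(call_map: Dict[str, Set[str]]) -> Dict[str, Set[str]]:
--     """Return callee → {callers} from a caller → {callees} map."""
--     inv: Dict[str, Set[str]] = defaultdict(set)
--     for caller, callees in call_map.items():
--         for callee in callees:
--             inv[callee].add(caller)
--     return dict(inv)
--
-- def find_root_callers(
--     call_map: Dict[str, Set[str]],
--     target: str,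
-- ) -> Set[str]:
--     """
--     BFS backwards through *call_map* from *target* to find root callers
--     (functions that are not called by any other function in the map).
--
--     Parameters
--     ----------
--     call_map:
--         caller → {callees} mapping (as returned by
--         :func:`extract_calls_from_file`).
--     target:
--         The function name to trace callers for.
--
--     Returns
--     -------
--     set of str
--         Function names that are root callers of *target*.
--     """
--     callee_to_callers = invert_call_map(call_map)
--
--     roots: Set[str] = set()
--     visited: Set[str] = set()
--     frontier: List[str] = []
--
--     # Seed: direct callers of target
--     for caller in callee_to_callers.get(target, set()):
--         if caller != target:
--             frontier.append(caller)
--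
--     while frontier:
--         func = frontier.pop(0)
--         if func in visited:
--             continue
--         visited.add(func)
--
--         # A root is a function that nobody else in the call_map calls
--         callers_of_func = callee_to_callers.get(func, set()) - {func}
--         if not callers_of_func:
--             roots.add(func)
--         else:
--             for caller in callers_of_func:
--                 if caller not in visited:
--                     frontier.append(caller)
--
--     return roots
-- ===== SOURCE B (Python) =====
-- def find_root_callers(call_map, target):
--     """Index-free recursive generation expansion: no inverted call map is
--     built; callers of a function are found by scanning call_map directly,
--     whole generations of ancestors are expanded recursively with set
--     algebra, and roots are selected by a final filter pass."""
--
--     def callers(f):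
--         # everyone (other than f itself) whose callee set contains f
--         return {c for c, callees in call_map.items() if f in callees and c != f}
--
--     def expand(generation, seen):
--         # all ancestors strictly newer than *seen*, generation by generation
--         if not generation:
--             return set()
--         nxt = set().union(*(callers(f) for f in generation)) - seen
--         return nxt | expand(nxt, seen | nxt)
--
--     first = callers(target)
--     ancestors = first | expand(first, first)
--     return {f for f in ancestors if not callers(f)}
-- ===== Notes on version B (the rewrite author's own statement) =====
-- stated objective: alternative
-- what changed: A builds an inverted callee-to-callers index and runs a FIFO-queue BFS with a visited set, classifying roots while visiting; B builds no inverted index at all: it finds callers by scanning call_map directly, expands whole generations of ancestors with a recursive set-algebra helper (union of callers minus seen), and selects roots in a final filter pass.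
import Mathlib
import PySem

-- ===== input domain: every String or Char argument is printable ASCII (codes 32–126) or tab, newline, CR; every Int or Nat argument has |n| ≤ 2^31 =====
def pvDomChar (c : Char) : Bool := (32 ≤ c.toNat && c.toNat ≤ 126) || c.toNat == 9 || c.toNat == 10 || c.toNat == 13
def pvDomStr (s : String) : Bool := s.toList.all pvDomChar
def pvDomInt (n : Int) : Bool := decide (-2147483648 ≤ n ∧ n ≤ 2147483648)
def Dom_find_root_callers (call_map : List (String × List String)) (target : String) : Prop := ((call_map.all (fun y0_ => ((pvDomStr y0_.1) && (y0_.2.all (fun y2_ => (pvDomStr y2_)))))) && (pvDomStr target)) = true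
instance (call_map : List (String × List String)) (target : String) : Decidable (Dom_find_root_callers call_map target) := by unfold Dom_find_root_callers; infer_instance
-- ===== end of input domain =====

-- B builds no inverted index: callers are found by scanning call_map directly, whole
-- generations of ancestors are expanded by a recursive set-algebra helper, and roots are
-- selected by a final filter pass (objective: alternative, same worst-case cost).

-- ===== PORT A =====
-- shared module helper of A: invert_call_map (callee -> set of callers, first-touch insertion order)
def invert_call_map (call_map : List (String × List String)) : PySem.Dict String (PySem.Set String) :=
  ((PySem.Dict.ofList call_map).items).foldl
    (fun inv p =>
      p.2.foldl
        (fun inv2 callee => PySem.Dict.modify inv2 callee PySem.Set.empty (fun s => PySem.Set.add s p.1))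
        inv)
    PySem.Dict.empty

-- callee_to_callers.get(func, set()) - {func}
def pvCallersOf (inv : PySem.Dict String (PySem.Set String)) (func : String) : List String :=
  PySem.Set.diff (PySem.Dict.getD inv func PySem.Set.empty) [func]

-- A's while-loop over the FIFO frontier; fuel only guards totality (a new function is visited
-- at most once per distinct caller, so call_map.length pops that visit a new node suffice;
-- pops of already-visited nodes consume no fuel).
def pvAloop (inv : PySem.Dict String (PySem.Set String)) (fuel : Nat) (frontier : List String)
    (visited roots : PySem.Set String) : PySem.Set String :=
  match fuel, frontier with
  | _, [] => roots
  | fuel, func :: rest =>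
    if PySem.Set.contains visited func then
      pvAloop inv fuel rest visited roots
    else
      match fuel with
      | 0 => roots
      | fuel' + 1 =>
        let visited' := PySem.Set.add visited func
        let cs := pvCallersOf inv func
        if cs = [] then
          pvAloop inv fuel' rest visited' (PySem.Set.add roots func)
        else
          pvAloop inv fuel' (rest ++ cs.filter (fun c => !PySem.Set.contains visited' c)) visited' roots
  termination_by (fuel, frontier.length)

def find_root_callers (call_map : List (String × List String)) (target : String) : List String :=
  let inv := invert_call_map call_map
  pvAloop inv call_map.length (pvCallersOf inv target) PySem.Set.empty PySem.Set.empty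

-- ===== PORT B =====
-- Source B's callers(f): direct scan of call_map.items(), no inverted index
def pvCallers (call_map : List (String × List String)) (f : String) : PySem.Set String :=
  ((PySem.Dict.ofList call_map).items).foldl
    (fun s p => if f ∈ p.2 ∧ p.1 ≠ f then PySem.Set.add s p.1 else s) PySem.Set.empty

-- Source B's expand(generation, seen); the fuel only guards totality (each nonempty
-- generation contains at least one not-yet-seen function).
def pvExpand (call_map : List (String × List String)) :
    Nat → PySem.Set String → PySem.Set String → PySem.Set String
  | _, [], _ => PySem.Set.empty
  | 0, _, _ => PySem.Set.empty
  | fuel + 1, generation, seen =>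
    let nxt := PySem.Set.diff
      (generation.foldl (fun acc f => PySem.Set.union acc (pvCallers call_map f)) PySem.Set.empty)
      seen
    PySem.Set.union nxt (pvExpand call_map fuel nxt (PySem.Set.union seen nxt))

def find_root_callers_alt (call_map : List (String × List String)) (target : String) : List String :=
  let first := pvCallers call_map target
  let ancestors := PySem.Set.union first (pvExpand call_map call_map.length first first)
  ancestors.foldl
    (fun s f => if pvCallers call_map f = PySem.Set.empty then PySem.Set.add s f else s)
    PySem.Set.empty

-- ===== PRECONDITION & SPEC =====
def Spec_find_root_callers (call_map : List (String × List String)) (target : String) (out : List String) : Prop := out = find_root_callers_alt call_map target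
instance (call_map : List (String × List String)) (target : String) (out : List String) : Decidable (Spec_find_root_callers call_map target out) := by unfold Spec_find_root_callers; infer_instance

-- ===== CLAIM (what is proved, stated in full; the proofs are below) =====
def Claim_equal_find_root_callers : Prop := ∀ (call_map : List (String × List String)) (target : String), Dom_find_root_callers call_map target → Spec_find_root_callers call_map target (find_root_callers call_map target)

-- ===== LEMMAS AND PROOFS =====
def pvDfRec (s : List String) : List String → List String
  | [] => []
  | c :: l => if c ∈ s then pvDfRec s l else c :: pvDfRec (s ++ [c]) l
def pvApp (inv : PySem.Dict String (PySem.Set String)) (vpre : List String) : List String → List String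
  | [] => []
  | x :: xs =>
      (pvCallersOf inv x).filter (fun c => !PySem.Set.contains (vpre ++ [x]) c)
        ++ pvApp inv (vpre ++ [x]) xs

lemma pv_pass (inv : PySem.Dict String (PySem.Set String)) :
    ∀ (p q visited roots : List String) (f : Nat),
    p.Nodup → (∀ x ∈ p, x ∉ visited) → (∀ x ∈ roots, x ∈ visited) → p.length ≤ f →
    pvAloop inv f (p ++ q) visited roots
      = pvAloop inv (f - p.length) (q ++ pvApp inv visited p) (visited ++ p)
          (roots ++ p.filter (fun x => decide (pvCallersOf inv x = []))) := by
  intro p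
  induction p with
  | nil => intro q visited roots f _ _ _ _; simp [pvApp]
  | cons x xs ih =>
    intro q visited roots f hnd hfresh hroots hf
    have hxv : x ∉ visited := hfresh x List.mem_cons_self
    obtain ⟨f', rfl⟩ : ∃ f', f = f' + 1 := by
      cases f with
      | zero => simp at hf
      | succ n => exact ⟨n, rfl⟩
    have hcont : PySem.Set.contains visited x = false := by
      rw [← Bool.not_eq_true]
      intro h
      exact hxv ((PySem.Set.contains_iff _ _).mp h)
    have hadd : PySem.Set.add visited x = visited ++ [x] := PySem.Set.add_of_not_mem hxv
    rw [List.cons_append, pvAloop]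
    simp only [hcont, Bool.false_eq_true, if_false, hadd]
    by_cases hcs : pvCallersOf inv x = []
    · rw [if_pos hcs]
      have hradd : PySem.Set.add roots x = roots ++ [x] :=
        PySem.Set.add_of_not_mem (fun h => hxv (hroots x h))
      rw [hradd, ih (q := q) (visited := visited ++ [x]) (roots := roots ++ [x]) (f := f')
        (List.Nodup.of_cons hnd)
        (by intro y hy h
            rcases List.mem_append.mp h with h' | h'
            · exact hfresh y (List.mem_cons_of_mem _ hy) h'
            · rw [List.mem_singleton] at h'; subst h'; exact (List.nodup_cons.mp hnd).1 hy)
        (by intro y hy; simp at hy ⊢; tauto)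
        (by simpa using hf)]
      simp [pvApp, hcs, List.append_assoc, Nat.succ_sub_succ]
    · rw [if_neg hcs, List.append_assoc]
      rw [ih (q := q ++ (pvCallersOf inv x).filter (fun c => !PySem.Set.contains (visited ++ [x]) c))
        (visited := visited ++ [x]) (roots := roots) (f := f')
        (List.Nodup.of_cons hnd)
        (by intro y hy h
            rcases List.mem_append.mp h with h' | h'
            · exact hfresh y (List.mem_cons_of_mem _ hy) h'
            · rw [List.mem_singleton] at h'; subst h'; exact (List.nodup_cons.mp hnd).1 hy)
        (by intro y hy; exact List.mem_append_left _ (hroots y hy))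
        (by simpa using hf)]
      simp [pvApp, hcs, List.append_assoc, Nat.succ_sub_succ]

lemma pv_dfskip (inv : PySem.Dict String (PySem.Set String)) :
    ∀ (q t visited roots : List String) (f : Nat),
    pvAloop inv f (q ++ t) visited roots = pvAloop inv f (pvDfRec visited q ++ t) visited roots := by
  intro q
  induction q with
  | nil => intro t visited roots f; simp [pvDfRec]
  | cons x xs ih =>
    intro t visited roots f
    by_cases hx : x ∈ visited
    · have hcont : PySem.Set.contains visited x = true := (PySem.Set.contains_iff _ _).mpr hx
      rw [List.cons_append, pvAloop.eq_def]
      simp only [hcont, if_true]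
      rw [show pvDfRec visited (x :: xs) = pvDfRec visited xs by simp [pvDfRec, hx]]
      exact ih t visited roots f
    · have hcont : PySem.Set.contains visited x = false := by
        rw [← Bool.not_eq_true]; intro h; exact hx ((PySem.Set.contains_iff _ _).mp h)
      rw [show pvDfRec visited (x :: xs) = x :: pvDfRec (visited ++ [x]) xs by simp [pvDfRec, hx]]
      rw [List.cons_append, List.cons_append, pvAloop.eq_def,
        show pvAloop inv f (x :: (pvDfRec (visited ++ [x]) xs ++ t)) visited roots
          = _ from pvAloop.eq_def ..]
      simp only [hcont, Bool.false_eq_true, if_false]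
      cases f with
      | zero => rfl
      | succ f' =>
        have hadd : PySem.Set.add visited x = visited ++ [x] := PySem.Set.add_of_not_mem hx
        simp only [hadd]
        by_cases hcs : pvCallersOf inv x = []
        · simp only [hcs, if_pos]
          exact ih t (visited ++ [x]) _ f'
        · simp only [hcs, ite_false]
          rw [List.append_assoc, ih, ← List.append_assoc]

lemma pv_dfRec_filter : ∀ (l s : List String) (pred : String → Bool),
    (∀ c ∈ l, pred c = false → c ∈ s) → pvDfRec s (l.filter pred) = pvDfRec s l := by
  intro l
  induction l with
  | nil => intro s pred h; simp
  | cons c l ih =>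
    intro s pred h
    by_cases hp : pred c
    · rw [List.filter_cons_of_pos hp]
      simp only [pvDfRec]
      by_cases hc : c ∈ s
      · simp [hc]; exact ih s pred (fun c hc hf => h c (List.mem_cons_of_mem _ hc) hf)
      · simp [hc]
        exact ih _ pred (fun x hx hf => List.mem_append_left _ (h x (List.mem_cons_of_mem _ hx) hf))
    · rw [List.filter_cons_of_neg (by simpa using hp)]
      have hc : c ∈ s := h c List.mem_cons_self (by simpa using hp)
      rw [show pvDfRec s (c :: l) = pvDfRec s l by simp [pvDfRec, hc]]
      exact ih s pred (fun x hx hf => h x (List.mem_cons_of_mem _ hx) hf)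

lemma pv_dfRec_append : ∀ (l₁ l₂ s : List String),
    pvDfRec s (l₁ ++ l₂) = pvDfRec s l₁ ++ pvDfRec (s ++ pvDfRec s l₁) l₂ := by
  intro l₁
  induction l₁ with
  | nil => intro l₂ s; simp [pvDfRec]
  | cons c l ih =>
    intro l₂ s
    simp only [List.cons_append, pvDfRec]
    by_cases hc : c ∈ s
    · simp [hc, ih]
    · simp only [hc, ite_false]
      rw [ih]
      simp [List.append_assoc]

lemma pv_app_df (inv : PySem.Dict String (PySem.Set String)) :
    ∀ (p vpre s : List String), (∀ x ∈ vpre, x ∈ s) → (∀ x ∈ p, x ∈ s) →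
    pvDfRec s (pvApp inv vpre p) = pvDfRec s (p.flatMap (pvCallersOf inv)) := by
  intro p
  induction p with
  | nil => intro vpre s _ _; simp [pvApp]
  | cons x xs ih =>
    intro vpre s hv hp
    simp only [pvApp, List.flatMap_cons]
    rw [pv_dfRec_append, pv_dfRec_append]
    have hseg : pvDfRec s ((pvCallersOf inv x).filter (fun c => !PySem.Set.contains (vpre ++ [x]) c))
        = pvDfRec s (pvCallersOf inv x) := by
      apply pv_dfRec_filter
      intro c hc hf
      have hf' : PySem.Set.contains (vpre ++ [x]) c = true := by
        revert hf; cases PySem.Set.contains (vpre ++ [x]) c <;> simp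
      have : c ∈ vpre ++ [x] := (PySem.Set.contains_iff _ _).mp hf'
      rcases List.mem_append.mp this with h' | h'
      · exact hv c h'
      · rw [List.mem_singleton] at h'; subst h'; exact hp _ List.mem_cons_self
    rw [hseg]
    congr 1
    apply ih
    · intro y hy
      rcases List.mem_append.mp hy with h' | h'
      · exact List.mem_append_left _ (hv y h')
      · rw [List.mem_singleton] at h'; subst h'
        exact List.mem_append_left _ (hp _ List.mem_cons_self)
    · intro y hy
      exact List.mem_append_left _ (hp y (List.mem_cons_of_mem _ hy))

lemma pv_filter_len : ∀ (L v p : List String), L.Nodup → p.Nodup →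
    (∀ x ∈ p, x ∈ L) → (∀ x ∈ p, x ∉ v) →
    (L.filter (fun x => !decide (x ∈ v ++ p))).length + p.length
      ≤ (L.filter (fun x => !decide (x ∈ v))).length := by
  intro L v p hL hp hpL hpv
  have h1 : L.filter (fun x => !decide (x ∈ v ++ p))
      = (L.filter (fun x => !decide (x ∈ v))).filter (fun x => !decide (x ∈ p)) := by
    rw [List.filter_filter]
    apply List.filter_congr
    intro x _
    simp only [List.mem_append]
    cases h1 : decide (x ∈ v) <;> cases h2 : decide (x ∈ p) <;> simp_all
  rw [h1]
  set M := L.filter (fun x => !decide (x ∈ v)) with hM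
  have hMnd : M.Nodup := hL.filter _
  have hpM : ∀ x ∈ p, x ∈ M := by
    intro x hx
    rw [hM, List.mem_filter]
    exact ⟨hpL x hx, by simp [hpv x hx]⟩
  have hperm : (M.filter (fun x => decide (x ∈ p))).Perm p := by
    apply List.Perm.symm
    apply (List.perm_ext_iff_of_nodup hp (hMnd.filter _)).mpr
    intro x
    simp only [List.mem_filter, decide_eq_true_eq]
    exact ⟨fun hx => ⟨hpM x hx, hx⟩, fun h => h.2⟩
  have hsplit : (M.filter (fun x => decide (x ∈ p))).length
      + (M.filter (fun x => !decide (x ∈ p))).length = M.length := by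
    exact (List.length_eq_length_filter_add (fun x => decide (x ∈ p))).symm
  have : (M.filter (fun x => decide (x ∈ p))).length = p.length := hperm.length_eq
  omega

lemma pv_dfRec_mem : ∀ (l s : List String) (x : String), x ∈ pvDfRec s l → x ∈ l ∧ x ∉ s := by
  intro l
  induction l with
  | nil => intro s x h; simp [pvDfRec] at h
  | cons c l ih =>
    intro s x h
    simp only [pvDfRec] at h
    by_cases hc : c ∈ s
    · simp [hc] at h
      rcases ih s x h with ⟨h1, h2⟩
      exact ⟨List.mem_cons_of_mem _ h1, h2⟩
    · simp [hc] at h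
      rcases h with rfl | h
      · exact ⟨List.mem_cons_self, hc⟩
      · rcases ih _ x h with ⟨h1, h2⟩
        simp at h2
        exact ⟨List.mem_cons_of_mem _ h1, h2.1⟩

lemma pv_dfRec_nodup : ∀ (l s : List String), (pvDfRec s l).Nodup := by
  intro l
  induction l with
  | nil => intro s; simp [pvDfRec]
  | cons c l ih =>
    intro s
    simp only [pvDfRec]
    by_cases hc : c ∈ s
    · simp [hc]; exact ih s
    · simp [hc]
      refine ⟨fun h => ?_, ih _⟩
      have := (pv_dfRec_mem _ _ _ h).2
      simp at this

lemma pv_keys_len (call_map : List (String × List String)) :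
    (PySem.Dict.ofList call_map).keys.length ≤ call_map.length := by
  have h : (PySem.Dict.ofList call_map).keys = PySem.Set.ofList (call_map.map Prod.fst) := by
    rw [show PySem.Dict.ofList call_map = PySem.Dict.empty.update call_map from rfl]
    rw [show PySem.Dict.update (PySem.Dict.empty : PySem.Dict String (PySem.Set String)) call_map
        = call_map.foldl (fun d x => d.insert x.1 x.2) PySem.Dict.empty from rfl]
    have := PySem.Dict.keys_foldl_insert_key (l := call_map) (key := Prod.fst)
      (f := fun _ x => x.2) (d := (PySem.Dict.empty : PySem.Dict String (PySem.Set String)))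
    rw [this]
    simp [PySem.Set.update_nil_left]
  rw [h]
  calc (PySem.Set.ofList (call_map.map Prod.fst)).length
      ≤ (call_map.map Prod.fst).length := PySem.Set.length_ofList_le _
    _ = call_map.length := List.length_map ..

-- effect on one key of the inner fold of invert_call_map
lemma pv_inner_getD : ∀ (cs : List String) (d2 : PySem.Dict String (PySem.Set String))
    (caller g : String),
    ((cs.foldl (fun inv2 callee =>
        PySem.Dict.modify inv2 callee PySem.Set.empty (fun s => PySem.Set.add s caller)) d2).getD
      g PySem.Set.empty)
    = if g ∈ cs then PySem.Set.add (d2.getD g PySem.Set.empty) caller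
      else d2.getD g PySem.Set.empty := by
  intro cs
  induction cs with
  | nil => intro d2 caller g; simp
  | cons c cs ih =>
    intro d2 caller g
    simp only [List.foldl_cons]
    rw [ih, PySem.Dict.getD_modify]
    by_cases hgc : g = c
    · subst hgc
      by_cases hg : g ∈ cs
      · simp [hg]
      · simp [hg]
    · by_cases hg : g ∈ cs
      · simp [List.mem_cons, hg, hgc]
      · simp [List.mem_cons, hg, hgc]

-- full characterisation of invert_call_map on one key
lemma pv_inv_eq (call_map : List (String × List String)) (g : String) :
    (invert_call_map call_map).getD g PySem.Set.empty
    = ((PySem.Dict.ofList call_map).items).foldl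
        (fun acc p => if g ∈ p.2 then PySem.Set.add acc p.1 else acc) PySem.Set.empty := by
  rw [invert_call_map]
  have key : ∀ (items : List (String × List String)) (d : PySem.Dict String (PySem.Set String)),
      ((items.foldl (fun inv p => p.2.foldl
          (fun inv2 callee => PySem.Dict.modify inv2 callee PySem.Set.empty
            (fun s => PySem.Set.add s p.1)) inv) d).getD g PySem.Set.empty)
      = items.foldl (fun acc p => if g ∈ p.2 then PySem.Set.add acc p.1 else acc)
          (d.getD g PySem.Set.empty) := by
    intro items
    induction items with
    | nil => intro d; simp
    | cons p rest ih =>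
      intro d
      simp only [List.foldl_cons]
      rw [ih, pv_inner_getD]
  rw [key]
  simp [PySem.Dict.getD_empty]

lemma pv_condfold_nodup : ∀ (items : List (String × List String)) (s : PySem.Set String)
    (g : String), s.Nodup →
    (items.foldl (fun acc p => if g ∈ p.2 then PySem.Set.add acc p.1 else acc) s).Nodup := by
  intro items
  induction items with
  | nil => intro s g h; simpa using h
  | cons p rest ih =>
    intro s g h
    simp only [List.foldl_cons]
    apply ih
    by_cases hp : g ∈ p.2
    · rw [if_pos hp]; exact PySem.Set.nodup_add _ _ h
    · rw [if_neg hp]; exact h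

lemma pv_condfold_mem : ∀ (items : List (String × List String)) (s : PySem.Set String)
    (g x : String),
    x ∈ items.foldl (fun acc p => if g ∈ p.2 then PySem.Set.add acc p.1 else acc) s →
    x ∈ s ∨ ∃ p ∈ items, x = p.1 := by
  intro items
  induction items with
  | nil => intro s g x h; simp at h; exact Or.inl h
  | cons p rest ih =>
    intro s g x h
    simp only [List.foldl_cons] at h
    rcases ih _ g x h with h' | ⟨q, hq, hx⟩
    · by_cases hp : g ∈ p.2
      · rw [if_pos hp] at h'
        rcases (PySem.Set.mem_add _ _ _).mp h' with h'' | h''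
        · exact Or.inl h''
        · exact Or.inr ⟨p, List.mem_cons_self, h''⟩
      · rw [if_neg hp] at h'; exact Or.inl h'
    · exact Or.inr ⟨q, List.mem_cons_of_mem _ hq, hx⟩

lemma pv_g_nodup (call_map : List (String × List String)) (f : String) :
    (pvCallersOf (invert_call_map call_map) f).Nodup := by
  rw [pvCallersOf, pv_inv_eq]
  exact PySem.Set.nodup_diff _ _ (pv_condfold_nodup _ _ _ (by simp))

lemma pv_g_sub (call_map : List (String × List String)) (f c : String) :
    c ∈ pvCallersOf (invert_call_map call_map) f → c ∈ (PySem.Dict.ofList call_map).keys := by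
  intro hc
  rw [pvCallersOf, pv_inv_eq] at hc
  have := ((PySem.Set.mem_diff _ _ _).mp hc).1
  rcases pv_condfold_mem _ _ _ _ this with h | ⟨p, hp, hx⟩
  · simp at h
  · subst hx; exact PySem.Dict.mem_keys_of_mem_items _ hp

-- removing {f} from the accumulated caller set commutes with the fold; together with
-- pv_inv_eq this identifies B's direct scan with A's inverted-map lookup
lemma pv_diff_add (s : PySem.Set String) (x f : String) :
    PySem.Set.diff (PySem.Set.add s x) [f]
    = if x = f then PySem.Set.diff s [f] else PySem.Set.add (PySem.Set.diff s [f]) x := by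
  by_cases hx : x ∈ s
  · rw [PySem.Set.add_of_mem hx]
    by_cases hxf : x = f
    · rw [if_pos hxf]
    · rw [if_neg hxf, PySem.Set.add_of_mem ((PySem.Set.mem_diff _ _ _).mpr ⟨hx, by simp [hxf]⟩)]
  · rw [PySem.Set.add_of_not_mem hx]
    by_cases hxf : x = f
    · rw [if_pos hxf]
      simp [PySem.Set.diff, hxf]
    · rw [if_neg hxf,
        PySem.Set.add_of_not_mem (fun h => hx ((PySem.Set.mem_diff _ _ _).mp h).1)]
      simp [PySem.Set.diff, hxf]

lemma pv_callers_eq (call_map : List (String × List String)) :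
    pvCallers call_map = pvCallersOf (invert_call_map call_map) := by
  funext f
  rw [pvCallers, pvCallersOf, pv_inv_eq]
  have key : ∀ (items : List (String × List String)) (acc : PySem.Set String),
      PySem.Set.diff
        (items.foldl (fun acc p => if f ∈ p.2 then PySem.Set.add acc p.1 else acc) acc) [f]
      = items.foldl (fun s p => if f ∈ p.2 ∧ p.1 ≠ f then PySem.Set.add s p.1 else s)
          (PySem.Set.diff acc [f]) := by
    intro items
    induction items with
    | nil => intro acc; simp
    | cons p rest ih =>
      intro acc
      simp only [List.foldl_cons]
      rw [ih]
      congr 1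
      by_cases hp : f ∈ p.2
      · rw [if_pos hp, pv_diff_add]
        by_cases hpf : p.1 = f
        · rw [if_pos hpf, if_neg (by simp [hpf])]
        · rw [if_neg hpf, if_pos ⟨hp, hpf⟩]
      · rw [if_neg hp, if_neg (by simp [hp])]
  rw [key]
  simp [PySem.Set.diff]

-- folding unions of caller sets = folding add over the concatenation
lemma pv_union_fold (G : String → List String) :
    ∀ (gen : List String) (acc : PySem.Set String),
    gen.foldl (fun acc f => PySem.Set.union acc (G f)) acc
      = (gen.flatMap G).foldl PySem.Set.add acc := by
  intro gen
  induction gen with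
  | nil => intro acc; simp
  | cons x xs ih =>
    intro acc
    simp only [List.foldl_cons, List.flatMap_cons, List.foldl_append]
    rw [ih]
    have h : PySem.Set.union acc (G x) = (G x).foldl PySem.Set.add acc := by
      rw [show PySem.Set.union acc (G x) = PySem.Set.update acc (G x) from rfl]
      have := PySem.Set.update_map_eq_foldl_add (s := acc) (l := G x) (f := id)
      simpa using this
    rw [h]

-- pvDfRec's context only matters up to membership
lemma pv_dfRec_congr : ∀ (l s s' : List String), (∀ x, x ∈ s ↔ x ∈ s') →
    pvDfRec s l = pvDfRec s' l := by
  intro l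
  induction l with
  | nil => intro s s' h; simp [pvDfRec]
  | cons c l ih =>
    intro s s' h
    simp only [pvDfRec]
    by_cases hc : c ∈ s
    · rw [if_pos hc, if_pos ((h c).mp hc)]; exact ih s s' h
    · rw [if_neg hc, if_neg (fun h' => hc ((h c).mpr h'))]
      congr 1
      exact ih _ _ (by intro x; simp [h x])

-- diff-after-accumulation is exactly the dedup-against-context pass pvDfRec
lemma pv_diff_foldl_add : ∀ (L s t : List String),
    PySem.Set.diff (L.foldl PySem.Set.add t) s
      = PySem.Set.diff t s ++ pvDfRec (s ++ t) L := by
  intro L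
  induction L with
  | nil => intro s t; simp [pvDfRec]
  | cons c l ih =>
    intro s t
    simp only [List.foldl_cons, pvDfRec]
    by_cases hct : c ∈ t
    · rw [PySem.Set.add_of_mem hct, ih, if_pos (List.mem_append.mpr (Or.inr hct))]
    · rw [PySem.Set.add_of_not_mem hct, ih]
      by_cases hcs : c ∈ s
      · rw [if_pos (List.mem_append.mpr (Or.inl hcs))]
        have hd : PySem.Set.diff (t ++ [c]) s = PySem.Set.diff t s := by
          simp only [PySem.Set.diff, List.filter_append]
          rw [show List.filter (fun x => !PySem.Set.contains s x) [c] = [] by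
            simp [hcs]]
          simp
        rw [hd, pv_dfRec_congr l (s ++ (t ++ [c])) (s ++ t) (by
          intro x
          simp only [List.mem_append, List.mem_singleton]
          constructor
          · rintro (h | h | rfl)
            · exact Or.inl h
            · exact Or.inr h
            · exact Or.inl hcs
          · rintro (h | h)
            · exact Or.inl h
            · exact Or.inr (Or.inl h))]
      · rw [if_neg (by simp [List.mem_append, hcs, hct])]
        have hd : PySem.Set.diff (t ++ [c]) s = PySem.Set.diff t s ++ [c] := by
          simp only [PySem.Set.diff, List.filter_append]
          rw [show List.filter (fun x => !PySem.Set.contains s x) [c] = [c] by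
            simp [hcs]]
        rw [hd]
        simp [List.append_assoc]

-- the final comprehension: a conditional-add fold over a duplicate-free fresh list is a filter
lemma pv_condfold_filter (P : String → Prop) [DecidablePred P] :
    ∀ (T acc : List String), T.Nodup → (∀ x ∈ T, x ∉ acc) →
    T.foldl (fun s f => if P f then PySem.Set.add s f else s) acc
      = acc ++ T.filter (fun x => decide (P x)) := by
  intro T
  induction T with
  | nil => intro acc _ _; simp
  | cons x xs ih =>
    intro acc hnd hfresh
    simp only [List.foldl_cons]
    by_cases hp : P x
    · rw [if_pos hp, PySem.Set.add_of_not_mem (hfresh x List.mem_cons_self)]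
      rw [ih (acc ++ [x]) (List.Nodup.of_cons hnd)
        (by intro y hy h
            rcases List.mem_append.mp h with h' | h'
            · exact hfresh y (List.mem_cons_of_mem _ hy) h'
            · rw [List.mem_singleton] at h'; subst h'; exact (List.nodup_cons.mp hnd).1 hy)]
      simp [hp, List.append_assoc]
    · rw [if_neg hp, ih acc (List.Nodup.of_cons hnd)
        (fun y hy => hfresh y (List.mem_cons_of_mem _ hy))]
      simp [hp]

lemma pvExpand_succ (call_map : List (String × List String)) (fuel : Nat) (x : String)
    (xs : List String) (seen : PySem.Set String) :
    pvExpand call_map (fuel + 1) (x :: xs) seen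
    = let nxt := PySem.Set.diff
        ((x :: xs).foldl (fun acc f => PySem.Set.union acc (pvCallers call_map f))
          PySem.Set.empty) seen
      PySem.Set.union nxt (pvExpand call_map fuel nxt (PySem.Set.union seen nxt)) := rfl

-- the central invariant: one generation block of B's pvExpand matches one pass of A's queue loop
lemma pv_main (call_map : List (String × List String))
    (inv : PySem.Dict String (PySem.Set String)) (K : List String) (hK : K.Nodup)
    (hEq : pvCallers call_map = pvCallersOf inv)
    (hgs : ∀ f c, c ∈ pvCallersOf inv f → c ∈ K) :
    ∀ (k f₁ f₂ : Nat) (p visited roots : List String),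
    p.Nodup → (∀ x ∈ p, x ∉ visited) → (∀ x ∈ p, x ∈ K) →
    (K.filter (fun x => !decide (x ∈ visited))).length ≤ k → k ≤ f₁ → k ≤ f₂ →
    (∀ x ∈ roots, x ∈ visited) →
    (p ++ pvExpand call_map f₂ p (visited ++ p)).Nodup ∧
    (∀ x ∈ p ++ pvExpand call_map f₂ p (visited ++ p), x ∉ visited) ∧
    pvAloop inv f₁ p visited roots
      = roots ++ (p ++ pvExpand call_map f₂ p (visited ++ p)).filter
          (fun x => decide (pvCallersOf inv x = [])) := by
  intro k
  induction k using Nat.strong_induction_on with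
  | _ k IH =>
    intro f₁ f₂ p visited roots hnd hfresh hpK hlen hkf₁ hkf₂ hroots
    cases p with
    | nil =>
      have he : ∀ v, pvExpand call_map f₂ [] v = [] := by
        intro v; cases f₂ <;> rfl
      refine ⟨by simp [he], by simp [he], ?_⟩
      cases f₁ <;> simp [pvAloop, he]
    | cons x xs =>
      have hplen : (x :: xs).length ≤ (K.filter (fun y => !decide (y ∈ visited))).length := by
        apply List.Subperm.length_le
        apply List.Nodup.subperm hnd
        intro y hy
        rw [List.mem_filter]
        exact ⟨hpK y hy, by simp [hfresh y hy]⟩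
      have hk1 : (x :: xs).length ≤ k := le_trans hplen hlen
      have hxlen : 0 < (x :: xs).length := by simp
      obtain ⟨f₂', rfl⟩ : ∃ f₂', f₂ = f₂' + 1 := by
        cases f₂ with
        | zero => exact absurd hkf₂ (by simp at hk1; omega)
        | succ n => exact ⟨n, rfl⟩
      set seen := visited ++ x :: xs with hseen
      set nxt := pvDfRec seen ((x :: xs).flatMap (pvCallersOf inv)) with hnxt
      -- B's generation step: the new generation is exactly nxt
      have hgen : PySem.Set.diff
          ((x :: xs).foldl (fun acc f => PySem.Set.union acc (pvCallers call_map f))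
            PySem.Set.empty) seen = nxt := by
        rw [hEq, pv_union_fold, pv_diff_foldl_add]
        simp [hnxt, PySem.Set.diff]
      have hnfresh : ∀ y ∈ nxt, y ∉ seen := fun y hy => (pv_dfRec_mem _ _ _ hy).2
      have hnnd : nxt.Nodup := pv_dfRec_nodup _ _
      have husn : PySem.Set.union seen nxt = seen ++ nxt :=
        PySem.Set.update_eq_append_of_disjoint _ _ hnnd hnfresh
      have hB1 : pvExpand call_map (f₂' + 1) (x :: xs) seen
          = PySem.Set.union nxt (pvExpand call_map f₂' nxt (seen ++ nxt)) := by
        rw [pvExpand_succ]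
        simp only [hgen, husn]
      -- one block of A
      have hA1 : pvAloop inv f₁ (x :: xs) visited roots
          = pvAloop inv (f₁ - (x :: xs).length) nxt seen
              (roots ++ (x :: xs).filter (fun y => decide (pvCallersOf inv y = []))) := by
        have h0 : pvAloop inv f₁ (x :: xs) visited roots
            = pvAloop inv f₁ ((x :: xs) ++ []) visited roots := by simp
        rw [h0, pv_pass inv (x :: xs) [] visited roots f₁ hnd hfresh hroots (by omega),
          List.nil_append]
        rw [show pvApp inv visited (x :: xs) = pvApp inv visited (x :: xs) ++ [] by simp,
          pv_dfskip, pv_app_df inv (x :: xs) visited (visited ++ x :: xs)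
            (fun y hy => List.mem_append_left _ hy) (fun y hy => List.mem_append_right _ hy)]
        simp [hseen, hnxt]
      have hnK : ∀ y ∈ nxt, y ∈ K := by
        intro y hy
        have := (pv_dfRec_mem _ _ _ hy).1
        rcases List.mem_flatMap.mp this with ⟨u, _, hu⟩
        exact hgs u y hu
      have hlen' : (K.filter (fun y => !decide (y ∈ seen))).length ≤ k - (x :: xs).length := by
        have := pv_filter_len K visited (x :: xs) hK hnd hpK hfresh
        rw [hseen]
        omega
      obtain ⟨h1, h2, h3⟩ :=
        IH (k - (x :: xs).length) (by omega)
          (f₁ - (x :: xs).length) f₂' nxt seen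
          (roots ++ (x :: xs).filter (fun y => decide (pvCallersOf inv y = [])))
          hnnd hnfresh hnK hlen' (by omega) (by omega)
          (by intro y hy
              rcases List.mem_append.mp hy with h | h
              · exact List.mem_append_left _ (hroots y h)
              · rw [hseen]
                exact List.mem_append_right _ (List.mem_of_mem_filter h))
      set E := pvExpand call_map f₂' nxt (seen ++ nxt) with hE
      have hEnd : E.Nodup := (List.nodup_append.mp h1).2.1
      have hEfresh : ∀ y ∈ E, y ∉ nxt := by
        intro y hy hyn
        exact List.disjoint_of_nodup_append h1 hyn hy
      have hune : PySem.Set.union nxt E = nxt ++ E :=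
        PySem.Set.update_eq_append_of_disjoint _ _ hEnd hEfresh
      have hblock : pvExpand call_map (f₂' + 1) (x :: xs) seen = nxt ++ E := by
        rw [hB1, hune]
      refine ⟨?_, ?_, ?_⟩
      · rw [hblock]
        rw [show (x :: xs) ++ (nxt ++ E) = (x :: xs) ++ (nxt ++ E) from rfl]
        apply List.Nodup.append hnd h1
        intro y hyp hyne
        exact h2 y hyne (by rw [hseen]; exact List.mem_append_right _ hyp)
      · rw [hblock]
        intro y hy
        rcases List.mem_append.mp hy with h | h
        · exact hfresh y h
        · intro hv
          exact h2 y h (by rw [hseen]; exact List.mem_append_left _ hv)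
      · rw [hblock, hA1, h3]
        simp [List.filter_append, List.filter_cons, List.append_assoc]
        split_ifs <;> simp

-- ===== VERDICT (by name: the statement is the Claim_ definition above) =====
theorem find_root_callers_spec : Claim_equal_find_root_callers := by
  intro call_map target _
  rw [Spec_find_root_callers, find_root_callers, find_root_callers_alt]
  set inv := invert_call_map call_map with hinv
  set K := (PySem.Dict.ofList call_map).keys with hK
  have hKnd : K.Nodup := PySem.Dict.nodup_keys_ofList call_map
  have hEq : pvCallers call_map = pvCallersOf inv := pv_callers_eq call_map
  obtain ⟨h1, h2, h3⟩ :=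
    pv_main call_map inv K hKnd hEq (fun f c => pv_g_sub call_map f c)
      K.length call_map.length call_map.length
      (pvCallersOf inv target) [] []
      (pv_g_nodup call_map target)
      (by simp)
      (fun c hc => pv_g_sub call_map target c hc)
      (by simp)
      (pv_keys_len call_map)
      (pv_keys_len call_map)
      (by simp)
  have he : (PySem.Set.empty : PySem.Set String) = [] := rfl
  rw [he, h3]
  simp only [List.nil_append] at h1 h2 ⊢
  rw [hEq]
  have hun : PySem.Set.union (pvCallersOf inv target)
      (pvExpand call_map call_map.length (pvCallersOf inv target) (pvCallersOf inv target))
      = pvCallersOf inv target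
        ++ pvExpand call_map call_map.length (pvCallersOf inv target) (pvCallersOf inv target) := by
    apply PySem.Set.update_eq_append_of_disjoint
    · exact (List.nodup_append.mp h1).2.1
    · intro y hy hyn
      exact List.disjoint_of_nodup_append h1 hyn hy
  rw [hun]
  rw [pv_condfold_filter (P := fun f => pvCallersOf inv f = []) _ _ h1 (by simp)]
  simp
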